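-- pv_equiv track=rewrite | github.com/jangsumin/python-coding-test | programmers/Lv1/모의고사/failSolution.py | solution
-- ===== SOURCE A (Python) =====
-- import math
--
-- def solution(answers):
--     # 반복되는 패턴 저장
--     pattern1 = [1, 2, 3, 4, 5]
--     pattern2 = [2, 1, 2, 3, 2, 4, 2, 5]
--     pattern3 = [3, 3, 1, 1, 2, 2, 4, 4, 5, 5]
--
--     # 문제 수만큼 패턴 늘리기
--     for i in range(math.ceil(len(answers) / len(pattern1)) - 1):
--         pattern1 += pattern1
--     for i in range(math.ceil(len(answers) / len(pattern2)) - 1):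
--         pattern2 += pattern2
--     for i in range(math.ceil(len(answers) / len(pattern3)) - 1):
--         pattern3 += pattern3
--
--     score1, score2, score3 = 0, 0, 0
--     for i in range(len(answers)):
--         if answers[i] == pattern1[i]: score1 += 1
--         if answers[i] == pattern2[i]: score2 += 1
--         if answers[i] == pattern3[i]: score3 += 1
--
--     res = []
--     if score1 == max(score1, score2, score3):
--         res.append(1)
--     if score2 == max(score1, score2, score3):
--         res.append(2)
--     if score3 == max(score1, score2, score3):
--         res.append(3)
--
--     return res
-- ===== SOURCE B (Python) =====
-- def solution(answers):
--     # All three patterns repeat with period dividing 40 (= lcm(5, 8, 10)), so one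
--     # histogram of (position mod 40, answer) determines every score: answers are
--     # scanned once, then each score is a sum over the 40 residues.
--     patterns = ([1, 2, 3, 4, 5],
--                 [2, 1, 2, 3, 2, 4, 2, 5],
--                 [3, 3, 1, 1, 2, 2, 4, 4, 5, 5])
--     cnt = {}
--     for i, a in enumerate(answers):
--         key = (i % 40, a)
--         cnt[key] = cnt.get(key, 0) + 1
--     s1, s2, s3 = (sum(cnt.get((r, p[r % len(p)]), 0) for r in range(40))
--                   for p in patterns)
--     best = max(s1, s2, s3)
--     return [k for k, s in ((1, s1), (2, s2), (3, s3)) if s == best]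
-- ===== Notes on version B (the rewrite author's own statement) =====
-- stated objective: faster
-- what changed: B builds a histogram dict keyed by (i % 40, answer) in a single pass (40 = lcm of the three pattern lengths) and computes each pattern's score as a sum of 40 histogram lookups, instead of A's repeated doubling of the pattern lists to at least the answer length followed by an indexed comparison loop.
import Mathlib
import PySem

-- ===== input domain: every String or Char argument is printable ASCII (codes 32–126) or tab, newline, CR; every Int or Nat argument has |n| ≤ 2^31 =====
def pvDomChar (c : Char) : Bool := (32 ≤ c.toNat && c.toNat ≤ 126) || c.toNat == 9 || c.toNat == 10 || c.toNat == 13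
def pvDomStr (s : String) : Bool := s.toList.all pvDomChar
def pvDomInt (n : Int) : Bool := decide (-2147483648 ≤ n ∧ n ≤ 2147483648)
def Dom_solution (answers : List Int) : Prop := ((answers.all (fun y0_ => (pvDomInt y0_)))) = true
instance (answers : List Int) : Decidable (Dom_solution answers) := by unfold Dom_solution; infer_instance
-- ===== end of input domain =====

-- B replaces A's exponential pattern doubling by a one-pass histogram keyed by (i % 40, answer)
-- (40 = lcm of the pattern lengths), scoring each pattern from 40 histogram lookups; objective: faster.

-- ===== PORT A =====
-- math.ceil(n / L) for 0 ≤ n ≤ 2^31 and literal L > 0 equals (n + L - 1) / L exactly (the float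
-- division is exact at this size); Python's range(ceil - 1) with ceil = 0 is range(-1) = empty,
-- which Nat subtraction 0 - 1 = 0 reproduces.
def solution (answers : List Int) : List Int :=
  let pattern1 : List Int := [1, 2, 3, 4, 5]
  let pattern2 : List Int := [2, 1, 2, 3, 2, 4, 2, 5]
  let pattern3 : List Int := [3, 3, 1, 1, 2, 2, 4, 4, 5, 5]
  let n := answers.length
  let pattern1 := (List.range ((n + 4) / 5 - 1)).foldl (fun p _ => p ++ p) pattern1
  let pattern2 := (List.range ((n + 7) / 8 - 1)).foldl (fun p _ => p ++ p) pattern2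
  let pattern3 := (List.range ((n + 9) / 10 - 1)).foldl (fun p _ => p ++ p) pattern3
  let s := (List.range n).foldl
    (fun (s : Int × Int × Int) i =>
      (if answers[i]? == pattern1[i]? then s.1 + 1 else s.1,
       if answers[i]? == pattern2[i]? then s.2.1 + 1 else s.2.1,
       if answers[i]? == pattern3[i]? then s.2.2 + 1 else s.2.2))
    (0, 0, 0)
  let m := max s.1 (max s.2.1 s.2.2)
  ((if s.1 = m then [1] else []) ++ (if s.2.1 = m then [2] else [])) ++ (if s.2.2 = m then [3] else [])

-- ===== PORT B =====
-- sum(cnt.get((r, p[r % len(p)]), 0) for r in range(40)); the index r % len(p) is always in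
-- range (0 ≤ r and len(p) > 0), so pyGetD's default is never used.
def pvScoreAlt (cnt : PySem.Dict (Int × Int) Int) (p : List Int) : Int :=
  ((PySem.List.pyRange 0 40).map
    (fun r => cnt.getD (r, PySem.List.pyGetD p (PySem.Int.mod r (p.length : Int)) 0) 0)).sum

-- cnt[key] = cnt.get(key, 0) + 1 over enumerate(answers); then the three sums, max, and the
-- comprehension over ((1, s1), (2, s2), (3, s3)).
def solution_alt (answers : List Int) : List Int :=
  let cnt := (PySem.List.enumerate answers).foldl
    (fun d ia =>
      let key := (PySem.Int.mod ia.1 40, ia.2)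
      d.insert key (d.getD key 0 + 1))
    PySem.Dict.empty
  let s1 := pvScoreAlt cnt [1, 2, 3, 4, 5]
  let s2 := pvScoreAlt cnt [2, 1, 2, 3, 2, 4, 2, 5]
  let s3 := pvScoreAlt cnt [3, 3, 1, 1, 2, 2, 4, 4, 5, 5]
  let best := max s1 (max s2 s3)
  [((1 : Int), s1), (2, s2), (3, s3)].foldl
    (fun acc ks => if ks.2 == best then acc ++ [ks.1] else acc) []

-- ===== PRECONDITION & SPEC =====
def Spec_solution (answers : List Int) (out : List Int) : Prop := out = solution_alt answers
instance (answers : List Int) (out : List Int) : Decidable (Spec_solution answers out) := by unfold Spec_solution; infer_instance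

-- ===== CLAIM (what is proved, stated in full; the proofs are below) =====
def Claim_equal_solution : Prop := ∀ (answers : List Int), Dom_solution answers → Spec_solution answers (solution answers)

-- ===== LEMMAS AND PROOFS =====

-- A's k-fold self-doubling, as a structural recursion
def pvDbl (p : List Int) : Nat → List Int
  | 0 => p
  | k + 1 => pvDbl p k ++ pvDbl p k

lemma pvFoldl_dbl (p : List Int) (k : Nat) :
    (List.range k).foldl (fun q _ => q ++ q) p = pvDbl p k := by
  induction k with
  | zero => rfl
  | succ k ih => rw [List.range_succ, List.foldl_append, ih]; rfl

lemma pvLength_dbl (p : List Int) (k : Nat) : (pvDbl p k).length = p.length * 2 ^ k := by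
  induction k with
  | zero => simp [pvDbl]
  | succ k ih => simp [pvDbl, ih, pow_succ]; ring

lemma pvGet_dbl (p : List Int) (k i : Nat) (h : i < p.length * 2 ^ k) :
    (pvDbl p k)[i]? = p[i % p.length]? := by
  induction k generalizing i with
  | zero =>
    simp only [pow_zero, Nat.mul_one] at h
    rw [Nat.mod_eq_of_lt h]; rfl
  | succ k ih =>
    have hD : (pvDbl p k).length = p.length * 2 ^ k := pvLength_dbl p k
    by_cases hi : i < p.length * 2 ^ k
    · show (pvDbl p k ++ pvDbl p k)[i]? = _
      rw [List.getElem?_append_left (by rw [hD]; exact hi)]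
      exact ih i hi
    · have h2 : i < p.length * 2 ^ k * 2 := by
        have : p.length * 2 ^ (k + 1) = p.length * 2 ^ k * 2 := by ring
        omega
      show (pvDbl p k ++ pvDbl p k)[i]? = _
      rw [List.getElem?_append_right (by omega)]
      rw [hD, ih (i - p.length * 2 ^ k) (by omega)]
      congr 1
      rw [Nat.sub_mul_mod (by omega)]

-- A's pattern always gets long enough: n ≤ L * 2 ^ ((n + L - 1) / L - 1)
lemma pvCover (L n : Nat) (hL : 0 < L) : n ≤ L * 2 ^ ((n + L - 1) / L - 1) := by
  rcases Nat.eq_zero_or_pos n with h0 | h0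
  · simp [h0]
  · have hdm := Nat.div_add_mod (n + L - 1) L
    have hmod := Nat.mod_lt (n + L - 1) hL
    set m := (n + L - 1) / L with hm
    have h1 : n ≤ L * m := by omega
    have hm1 : 1 ≤ m := by
      rcases Nat.eq_zero_or_pos m with h | h
      · rw [h] at h1; omega
      · exact h
    have h2 : m ≤ 2 ^ (m - 1) := by
      have := Nat.lt_two_pow_self (n := m - 1); omega
    calc n ≤ L * m := h1
      _ ≤ L * 2 ^ (m - 1) := Nat.mul_le_mul_left L h2

-- A's triple score loop as three independent counts
lemma pvFoldl3 {β : Type} (p1 p2 p3 : β → Bool) (l : List β) (a b c : Int) :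
    l.foldl (fun s i =>
      (if p1 i then s.1 + 1 else s.1,
       if p2 i then s.2.1 + 1 else s.2.1,
       if p3 i then s.2.2 + 1 else s.2.2)) (a, b, c)
    = (a + l.countP p1, b + l.countP p2, c + l.countP p3) := by
  induction l generalizing a b c with
  | nil => simp
  | cons x xs ih =>
    simp only [List.foldl_cons, List.countP_cons, ih]
    split_ifs <;> simp only [Prod.mk.injEq] <;> push_cast <;> omega

-- the big pattern indexes like the base pattern, below n
lemma pvCount_big (answers base : List Int) (k : Nat) (hk : answers.length ≤ base.length * 2 ^ k) :
    (List.range answers.length).countP (fun i => answers[i]? == (pvDbl base k)[i]?)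
    = (List.range answers.length).countP (fun i => answers[i]? == base[i % base.length]?) := by
  apply List.countP_congr
  intro i hi
  rw [pvGet_dbl base k i (lt_of_lt_of_le (List.mem_range.mp hi) hk)]

-- enumerate as an index map (Int lists; the default 0 is never read below the length)
lemma pvEnum_eq (xs : List Int) (s : Int) :
    PySem.List.enumerate xs s = (List.range xs.length).map (fun (i : Nat) => (s + (i : Int), xs.getD i 0)) := by
  induction xs generalizing s with
  | nil => simp [PySem.List.enumerate]
  | cons x xs ih =>
    rw [PySem.List.enumerate_cons, ih, List.length_cons, List.range_succ_eq_map,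
      List.map_cons, List.map_map]
    congr 1
    · simp
    · apply List.map_congr_left
      intro i _
      simp [Function.comp, Nat.succ_eq_add_one]
      ring

-- a 0/1 indicator summed over range n hits its single index
lemma pvIndSum (n r0 : Nat) (c : Int) :
    ((List.range n).map (fun r => if r = r0 then c else 0)).sum = if r0 < n then c else 0 := by
  induction n with
  | zero => simp
  | succ n ih =>
    rw [List.range_succ, List.map_append, List.sum_append, ih]
    by_cases h : n = r0 <;> by_cases h' : r0 < n <;> simp [h, h'] <;> omega

-- summing per-residue counts over all 40 residues is one countP over the pairs
lemma pvSumCount (g : Int → Int) (K : List (Int × Int))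
    (h : ∀ x ∈ K, ∃ r : Nat, r < 40 ∧ x.1 = (r : Int)) :
    ((List.range 40).map (fun r : Nat => (K.count (((r : Nat) : Int), g r) : Int))).sum
      = (K.countP (fun x => x.2 == g x.1) : Int) := by
  induction K with
  | nil => simp
  | cons x K ih =>
    obtain ⟨x1, x2⟩ := x
    obtain ⟨r0, hr0, hx1⟩ := h (x1, x2) (List.mem_cons_self)
    simp only at hx1
    subst hx1
    have hK := ih (fun y hy => h y (List.mem_cons_of_mem _ hy))
    have hsplit : ∀ r : Nat,
        ((((r0 : Int), x2) :: K).count (((r : Nat) : Int), g r) : Int)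
          = (K.count (((r : Nat) : Int), g r) : Int)
            + (if r = r0 ∧ x2 = g r0 then 1 else 0) := by
      intro r
      rw [List.count_cons]
      push_cast
      congr 1
      by_cases hr : r = r0
      · subst hr
        by_cases hv : x2 = g r
        · simp [hv]
        · simp [hv]
      · have hne : ((r0 : Int), x2) ≠ (((r : Nat) : Int), g r) := by
          intro he
          have h1 : (r0 : Int) = ((r : Nat) : Int) := congrArg Prod.fst he
          exact hr (by exact_mod_cast h1.symm)
        simp [hne, hr]
    calc ((List.range 40).map (fun r : Nat => ((((r0 : Int), x2) :: K).count (((r : Nat) : Int), g r) : Int))).sum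
        = ((List.range 40).map (fun r : Nat => (K.count (((r : Nat) : Int), g r) : Int)
            + (if r = r0 ∧ x2 = g r0 then 1 else 0))).sum := by
          apply congrArg
          exact List.map_congr_left (fun r _ => hsplit r)
      _ = ((List.range 40).map (fun r : Nat => (K.count (((r : Nat) : Int), g r) : Int))).sum
            + ((List.range 40).map (fun r : Nat => if r = r0 ∧ x2 = g r0 then (1 : Int) else 0)).sum := by
          rw [← List.sum_map_add]
      _ = (K.countP (fun x => x.2 == g x.1) : Int)
            + (if x2 == g (r0 : Int) then 1 else 0) := by
          rw [hK]
          congr 1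
          by_cases hv : x2 = g r0
          · have he : (fun r : Nat => if r = r0 ∧ x2 = g r0 then (1 : Int) else 0)
                = fun r : Nat => if r = r0 then (1 : Int) else 0 := by
              funext r; simp [hv]
            rw [he, pvIndSum 40 r0 1, if_pos hr0]
            simp [hv]
          · have he : (fun r : Nat => if r = r0 ∧ x2 = g r0 then (1 : Int) else 0)
                = fun _ : Nat => (0 : Int) := by
              funext r; simp [hv]
            rw [he]
            simp [hv]
      _ = ((((r0 : Int), x2) :: K).countP (fun x => x.2 == g x.1) : Int) := by
          rw [List.countP_cons]
          push_cast
          by_cases hv : x2 = g (r0 : Int) <;> simp [hv]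

-- B's histogram score equals the canonical modulo count
lemma pvScoreAlt_eq (answers p : List Int) (hne : p.length ≠ 0) (hdvd : p.length ∣ 40) :
    pvScoreAlt ((PySem.List.enumerate answers).foldl
      (fun d ia =>
        let key := (PySem.Int.mod ia.1 40, ia.2)
        d.insert key (d.getD key 0 + 1))
      PySem.Dict.empty) p
    = ((List.range answers.length).countP (fun i => answers[i]? == p[i % p.length]?) : Int) := by
  -- the loop is the counter of the key list K
  have hcnt : (PySem.List.enumerate answers).foldl
      (fun d ia =>
        let key := (PySem.Int.mod ia.1 40, ia.2)
        d.insert key (d.getD key 0 + 1))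
      PySem.Dict.empty
      = PySem.Dict.counter ((PySem.List.enumerate answers).map (fun ia => (PySem.Int.mod ia.1 40, ia.2))) := by
    rw [← PySem.Dict.foldl_insert_getD_add_one_eq_counter, List.foldl_map]
  rw [hcnt]
  -- the key list, indexed by range n
  have hK : (PySem.List.enumerate answers).map (fun ia => (PySem.Int.mod ia.1 40, ia.2))
      = (List.range answers.length).map (fun i : Nat => (((i % 40 : Nat) : Int), answers.getD i 0)) := by
    rw [pvEnum_eq answers 0, List.map_map]
    apply List.map_congr_left
    intro i _
    simp [Function.comp]
  unfold pvScoreAlt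
  have h40 : (40 : Int) = ((40 : Nat) : Int) := by norm_num
  rw [h40, PySem.List.pyRange_zero_natCast, List.map_map]
  have hsum := pvSumCount
    (fun r => PySem.List.pyGetD p (PySem.Int.mod r (p.length : Int)) 0)
    ((PySem.List.enumerate answers).map (fun ia => (PySem.Int.mod ia.1 40, ia.2)))
    (by
      intro x hx
      rw [hK] at hx
      obtain ⟨i, _, rfl⟩ := List.mem_map.mp hx
      exact ⟨i % 40, Nat.mod_lt i (by norm_num), rfl⟩)
  have hgoal : ((PySem.List.enumerate answers).map (fun ia => (PySem.Int.mod ia.1 40, ia.2))).countP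
      (fun x => x.2 == PySem.List.pyGetD p (PySem.Int.mod x.1 (p.length : Int)) 0)
      = (List.range answers.length).countP (fun i => answers[i]? == p[i % p.length]?) := by
    rw [hK, List.countP_map]
    apply List.countP_congr
    intro i hi
    have hi' : i < answers.length := List.mem_range.mp hi
    have hLpos : 0 < p.length := Nat.pos_of_ne_zero hne
    have hm : i % p.length < p.length := Nat.mod_lt i hLpos
    have hmod : PySem.Int.mod (((i % 40 : Nat) : Int)) (p.length : Int) = ((i % p.length : Nat) : Int) := by
      rw [PySem.Int.mod_natCast, Nat.mod_mod_of_dvd i hdvd]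
    simp only [Function.comp]
    rw [hmod, PySem.List.pyGetD_natCast]
    rw [List.getElem?_eq_getElem hi', List.getElem?_eq_getElem hm]
    rw [List.getD_eq_getElem answers 0 hi', List.getD_eq_getElem p 0 hm]
    simp
  calc ((List.range 40).map (fun r : Nat =>
        (PySem.Dict.counter ((PySem.List.enumerate answers).map (fun ia => (PySem.Int.mod ia.1 40, ia.2)))).getD
          (((r : Nat) : Int), PySem.List.pyGetD p (PySem.Int.mod ((r : Nat) : Int) (p.length : Int)) 0) 0)).sum
      = ((List.range 40).map (fun r : Nat =>
          (((PySem.List.enumerate answers).map (fun ia => (PySem.Int.mod ia.1 40, ia.2))).count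
            (((r : Nat) : Int), PySem.List.pyGetD p (PySem.Int.mod ((r : Nat) : Int) (p.length : Int)) 0) : Int))).sum := by
        apply congrArg
        apply List.map_congr_left
        intro r _
        exact PySem.Dict.getD_counter _ _
    _ = _ := by rw [hsum, hgoal]

-- ===== VERDICT (by name: the statement is the Claim_ definition above) =====
set_option maxRecDepth 8192 in
theorem solution_spec : Claim_equal_solution := by
  intro answers _
  show solution answers = solution_alt answers
  have hs1 := pvScoreAlt_eq answers [1, 2, 3, 4, 5] (by decide) (by decide)
  have hs2 := pvScoreAlt_eq answers [2, 1, 2, 3, 2, 4, 2, 5] (by decide) (by decide)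
  have hs3 := pvScoreAlt_eq answers [3, 3, 1, 1, 2, 2, 4, 4, 5, 5] (by decide) (by decide)
  have hc1 := pvCount_big answers [1, 2, 3, 4, 5] ((answers.length + 4) / 5 - 1)
    (by have h := pvCover 5 answers.length (by norm_num)
        have e : answers.length + 5 - 1 = answers.length + 4 := by omega
        rw [e] at h; simpa using h)
  have hc2 := pvCount_big answers [2, 1, 2, 3, 2, 4, 2, 5] ((answers.length + 7) / 8 - 1)
    (by have h := pvCover 8 answers.length (by norm_num)
        have e : answers.length + 8 - 1 = answers.length + 7 := by omega
        rw [e] at h; simpa using h)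
  have hc3 := pvCount_big answers [3, 3, 1, 1, 2, 2, 4, 4, 5, 5] ((answers.length + 9) / 10 - 1)
    (by have h := pvCover 10 answers.length (by norm_num)
        have e : answers.length + 10 - 1 = answers.length + 9 := by omega
        rw [e] at h; simpa using h)
  unfold solution solution_alt
  dsimp only
  rw [pvFoldl_dbl, pvFoldl_dbl, pvFoldl_dbl, pvFoldl3]
  simp only [hs1, hs2, hs3, hc1, hc2, hc3, zero_add,
    List.foldl_cons, List.foldl_nil, List.nil_append, beq_iff_eq]
  split_ifs <;> rfl
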